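-- pv_equiv track=rewrite | github.com/parafinserdar/Automata-Theory-Projects | cfg-total-language-tree/cfg.py | kelimeleri_uret
-- ===== SOURCE A (Python) =====
-- def kelimeleri_uret(cfg, baslangic_sembolu, alfabe):
--     kelimeler = []
--     stack = [(baslangic_sembolu, '')]
--
--     while stack:
--         mevcut, mevcut_kelime = stack.pop()
--
--         if mevcut == '':
--             kelimeler.append(mevcut_kelime)
--         else:
--             if mevcut[0] in alfabe:
--                 stack.append((mevcut[1:], mevcut_kelime + mevcut[0]))
--             elif mevcut[0] in cfg:
--                 genislemeler = cfg[mevcut[0]]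
--                 for genisleme in genislemeler:
--                     yeni_stack_elemani = (genisleme + mevcut[1:], mevcut_kelime)
--                     stack.append(yeni_stack_elemani)
--
--     return kelimeler
-- ===== SOURCE B (Python) =====
-- def kelimeleri_uret(cfg, baslangic_sembolu, alfabe):
--     kelimeler = []
--
--     def recurse(mevcut, mevcut_kelime):
--         # consume the leading run of terminal symbols iteratively
--         while mevcut != '' and mevcut[0] in alfabe:
--             mevcut_kelime = mevcut_kelime + mevcut[0]
--             mevcut = mevcut[1:]
--         if mevcut == '':
--             kelimeler.append(mevcut_kelime)
--         elif mevcut[0] in cfg: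
--             # the stack pops the last-pushed expansion first, so recurse in reversed order
--             for genisleme in reversed(cfg[mevcut[0]]):
--                 recurse(genisleme + mevcut[1:], mevcut_kelime)
--
--     recurse(baslangic_sembolu, '')
--     return kelimeler
-- ===== Notes on version B (the rewrite author's own statement) =====
-- stated objective: alternative
-- what changed: Replaces the explicit heap-allocated stack of (sentential form, word) pairs with a recursive-descent helper sharing one result list: it consumes leading terminal runs iteratively and recurses once per nonterminal expansion, visiting each symbol's productions in reversed order to reproduce the stack's LIFO output order exactly.
import Mathlib
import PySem

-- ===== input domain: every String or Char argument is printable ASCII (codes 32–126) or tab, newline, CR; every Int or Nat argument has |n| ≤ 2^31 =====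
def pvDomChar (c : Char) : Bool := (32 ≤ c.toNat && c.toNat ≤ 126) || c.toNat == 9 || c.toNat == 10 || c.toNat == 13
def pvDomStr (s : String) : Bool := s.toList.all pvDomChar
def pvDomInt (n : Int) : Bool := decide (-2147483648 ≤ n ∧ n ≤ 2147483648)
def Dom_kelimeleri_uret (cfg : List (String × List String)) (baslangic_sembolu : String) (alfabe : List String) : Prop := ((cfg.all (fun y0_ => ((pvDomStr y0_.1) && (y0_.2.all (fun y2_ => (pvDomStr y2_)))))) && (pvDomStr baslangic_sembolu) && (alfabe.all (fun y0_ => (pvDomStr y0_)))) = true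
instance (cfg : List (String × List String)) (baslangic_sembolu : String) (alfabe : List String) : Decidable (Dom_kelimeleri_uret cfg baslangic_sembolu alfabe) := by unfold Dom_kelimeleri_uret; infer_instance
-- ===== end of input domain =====

-- B replaces A's explicit stack DFS by a recursive-descent helper (productions visited in
-- reversed order to reproduce the stack's LIFO output order); same cost, different decomposition.
-- Both ports are guarded by the same (astronomically large) fuel, one unit per processed
-- configuration, threaded through B's recursion; the equivalence holds at every fuel.


-- fuel guard: one unit per loop iteration / recursive call; far beyond any computation
-- the Python could finish, so the ports are faithful wherever the Python terminates
def pvFuel : Nat := 2 ^ 64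

-- ===== PORT A =====
-- the Python while-loop; the stack's top is the HEAD of the list (append/pop at the front)
def pvLoopA (cfg : List (String × List String)) (alfabe : List String) :
    Nat → List (List Char × String) → List String → List String
  | 0, _, kelimeler => kelimeler
  | _ + 1, [], kelimeler => kelimeler
  | f + 1, (mevcut, mevcut_kelime) :: rest, kelimeler =>
    match mevcut with
    | [] => pvLoopA cfg alfabe f rest (kelimeler ++ [mevcut_kelime])
    | c :: tail =>
      if alfabe.contains (String.singleton c) then
        pvLoopA cfg alfabe f ((tail, mevcut_kelime.push c) :: rest) kelimeler
      else
        match (PySem.Dict.mk cfg).get? (String.singleton c) with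
        | some genislemeler =>
          pvLoopA cfg alfabe f
            (((genislemeler.map (fun g => (g.toList ++ tail, mevcut_kelime))).reverse) ++ rest)
            kelimeler
        | none => pvLoopA cfg alfabe f rest kelimeler

def kelimeleri_uret (cfg : List (String × List String)) (baslangic_sembolu : String) (alfabe : List String) : List String :=
  pvLoopA cfg alfabe pvFuel [(baslangic_sembolu.toList, "")] []

-- ===== PORT B =====
-- the recursive helper of Source B; the shared result list and the remaining fuel are threaded
-- through (the 'min … f' only makes the recursion structurally total; pvRecB_fuel_le shows
-- the returned fuel never exceeds the supplied one, so the min is the identity)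
mutual
def pvRecB (cfg : List (String × List String)) (alfabe : List String) :
    Nat → List Char → String → List String → List String × Nat
  | 0, _, _, kelimeler => (kelimeler, 0)
  | f + 1, [], mevcut_kelime, kelimeler => (kelimeler ++ [mevcut_kelime], f)
  | f + 1, c :: tail, mevcut_kelime, kelimeler =>
    if alfabe.contains (String.singleton c) then
      pvRecB cfg alfabe f tail (mevcut_kelime.push c) kelimeler
    else
      match (PySem.Dict.mk cfg).get? (String.singleton c) with
      | some genislemeler =>
        pvRecList cfg alfabe f genislemeler.reverse tail mevcut_kelime kelimeler
      | none => (kelimeler, f)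
termination_by f _ _ _ => (f, 0)
decreasing_by
  · exact Prod.Lex.left _ _ (Nat.lt_succ_self f)
  · exact Prod.Lex.left _ _ (Nat.lt_succ_self f)

def pvRecList (cfg : List (String × List String)) (alfabe : List String) :
    Nat → List String → List Char → String → List String → List String × Nat
  | f, [], _, _, kelimeler => (kelimeler, f)
  | f, g :: gs, tail, mevcut_kelime, kelimeler =>
    let p := pvRecB cfg alfabe f (g.toList ++ tail) mevcut_kelime kelimeler
    pvRecList cfg alfabe (min p.2 f) gs tail mevcut_kelime p.1
termination_by f gs _ _ _ => (f, gs.length + 1)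
decreasing_by
  · exact Prod.Lex.right _ (by simp)
  · rcases Nat.lt_or_ge (min p.2 f) f with h | h
    · exact Prod.Lex.left _ _ h
    · have he : min p.2 f = f := Nat.le_antisymm (Nat.min_le_right _ _) h
      rw [he]; exact Prod.Lex.right _ (by simp)
end

def kelimeleri_uret_alt (cfg : List (String × List String)) (baslangic_sembolu : String) (alfabe : List String) : List String :=
  (pvRecB cfg alfabe pvFuel baslangic_sembolu.toList "" []).1

-- ===== PRECONDITION & SPEC =====
def Spec_kelimeleri_uret (cfg : List (String × List String)) (baslangic_sembolu : String) (alfabe : List String) (out : List String) : Prop := out = kelimeleri_uret_alt cfg baslangic_sembolu alfabe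
instance (cfg : List (String × List String)) (baslangic_sembolu : String) (alfabe : List String) (out : List String) : Decidable (Spec_kelimeleri_uret cfg baslangic_sembolu alfabe out) := by unfold Spec_kelimeleri_uret; infer_instance

-- ===== CLAIM (what is proved, stated in full; the proofs are below) =====
def Claim_equal_kelimeleri_uret : Prop := ∀ (cfg : List (String × List String)) (baslangic_sembolu : String) (alfabe : List String), Dom_kelimeleri_uret cfg baslangic_sembolu alfabe → Spec_kelimeleri_uret cfg baslangic_sembolu alfabe (kelimeleri_uret cfg baslangic_sembolu alfabe)

-- ===== LEMMAS AND PROOFS =====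

theorem pv_fuel_le (cfg : List (String × List String)) (alfabe : List String) :
    (∀ f m w kel, (pvRecB cfg alfabe f m w kel).2 ≤ f) ∧
      (∀ f gs t w kel, (pvRecList cfg alfabe f gs t w kel).2 ≤ f) := by
  constructor
  · intro f m w kel
    induction f, m, w, kel using pvRecB.induct cfg alfabe
      (motive2 := fun f gs t w kel => (pvRecList cfg alfabe f gs t w kel).2 ≤ f) with
    | case1 => simp [pvRecB]
    | case2 => simp [pvRecB]
    | case3 f c tail w kel h ih =>
      simp only [pvRecB]; rw [if_pos h]; omega
    | case4 f c tail w kel h gens hg ih =>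
      simp only [pvRecB]; rw [if_neg h, hg]; exact le_trans ih (Nat.le_succ f)
    | case5 f c tail w kel h hg =>
      simp only [pvRecB]; rw [if_neg h, hg]; exact Nat.le_succ f
    | case6 => simp [pvRecList]
    | case7 f g gs tail w kel p ihB ihL =>
      simp only [pvRecList]
      exact le_trans ihL (Nat.min_le_right _ _)
  · intro f gs t w kel
    induction f, gs, t, w, kel using pvRecList.induct cfg alfabe
      (motive1 := fun f m w kel => (pvRecB cfg alfabe f m w kel).2 ≤ f) with
    | case1 => simp [pvRecB]
    | case2 => simp [pvRecB]
    | case3 f c tail w kel h ih =>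
      simp only [pvRecB]; rw [if_pos h]; omega
    | case4 f c tail w kel h gens hg ih =>
      simp only [pvRecB]; rw [if_neg h, hg]; exact le_trans ih (Nat.le_succ f)
    | case5 f c tail w kel h hg =>
      simp only [pvRecB]; rw [if_neg h, hg]; exact Nat.le_succ f
    | case6 => simp [pvRecList]
    | case7 f g gs tail w kel p ihB ihL =>
      simp only [pvRecList]
      exact le_trans ihL (Nat.min_le_right _ _)

theorem pvRecB_fuel_le (cfg : List (String × List String)) (alfabe : List String)
    (f : Nat) (m : List Char) (w : String) (kel : List String) :
    (pvRecB cfg alfabe f m w kel).2 ≤ f := (pv_fuel_le cfg alfabe).1 f m w kel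

-- pvRecList with the min collapsed
theorem pvRecList_cons (cfg : List (String × List String)) (alfabe : List String)
    (f : Nat) (g : String) (gs : List String) (t : List Char) (w : String) (kel : List String) :
    pvRecList cfg alfabe f (g :: gs) t w kel =
      pvRecList cfg alfabe (pvRecB cfg alfabe f (g.toList ++ t) w kel).2 gs t w
        (pvRecB cfg alfabe f (g.toList ++ t) w kel).1 := by
  simp only [pvRecList, Nat.min_eq_left (pvRecB_fuel_le cfg alfabe f (g.toList ++ t) w kel)]

-- proof-side: run B's recursion over a whole stack
def pvRunS (cfg : List (String × List String)) (alfabe : List String) :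
    Nat → List (List Char × String) → List String → List String × Nat
  | f, [], kel => (kel, f)
  | f, (m, w) :: rest, kel =>
    pvRunS cfg alfabe (pvRecB cfg alfabe f m w kel).2 rest (pvRecB cfg alfabe f m w kel).1

theorem pvRunS_append (cfg : List (String × List String)) (alfabe : List String)
    (s₁ s₂ : List (List Char × String)) : ∀ (f : Nat) (kel : List String),
    pvRunS cfg alfabe f (s₁ ++ s₂) kel =
      pvRunS cfg alfabe (pvRunS cfg alfabe f s₁ kel).2 s₂ (pvRunS cfg alfabe f s₁ kel).1 := by
  induction s₁ with
  | nil => intro f kel; simp [pvRunS]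
  | cons p rest ih => intro f kel; cases p; simp only [List.cons_append, pvRunS, ih]

theorem pvRecList_eq_runS (cfg : List (String × List String)) (alfabe : List String)
    (gs : List String) : ∀ (f : Nat) (t : List Char) (w : String) (kel : List String),
    pvRecList cfg alfabe f gs t w kel =
      pvRunS cfg alfabe f (gs.map (fun g => (g.toList ++ t, w))) kel := by
  induction gs with
  | nil => intro f t w kel; simp [pvRecList, pvRunS]
  | cons g gs ih => intro f t w kel; rw [pvRecList_cons]; simp only [List.map_cons, pvRunS, ih]

theorem pvRunS_zero (cfg : List (String × List String)) (alfabe : List String)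
    (stack : List (List Char × String)) : ∀ (kel : List String),
    pvRunS cfg alfabe 0 stack kel = (kel, 0) := by
  induction stack with
  | nil => intro kel; simp [pvRunS]
  | cons p rest ih => intro kel; cases p; simp only [pvRunS, pvRecB]; exact ih _

theorem pvLoopA_eq_runS (cfg : List (String × List String)) (alfabe : List String)
    (f : Nat) : ∀ (stack : List (List Char × String)) (kel : List String),
    pvLoopA cfg alfabe f stack kel = (pvRunS cfg alfabe f stack kel).1 := by
  induction f with
  | zero => intro stack kel; rw [pvRunS_zero]; cases stack with
    | nil => simp [pvLoopA]
    | cons p rest => cases p; simp [pvLoopA]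
  | succ f ih =>
    intro stack kel
    cases stack with
    | nil => simp [pvLoopA, pvRunS]
    | cons p rest =>
      obtain ⟨m, w⟩ := p
      cases m with
      | nil =>
        simp only [pvLoopA, pvRunS, pvRecB, ih]
      | cons c tail =>
        by_cases hc : alfabe.contains (String.singleton c)
        · have hB : pvRecB cfg alfabe (f + 1) (c :: tail) w kel
              = pvRecB cfg alfabe f tail (w.push c) kel := by
            simp only [pvRecB]; rw [if_pos hc]
          simp only [pvLoopA, if_pos hc, ih, pvRunS, hB]
        · cases hg : (PySem.Dict.mk cfg).get? (String.singleton c) with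
          | none =>
            have hB : pvRecB cfg alfabe (f + 1) (c :: tail) w kel = (kel, f) := by
              simp only [pvRecB]; rw [if_neg hc, hg]
            simp only [pvLoopA, if_neg hc, hg, ih, pvRunS, hB]
          | some gens =>
            have hB : pvRecB cfg alfabe (f + 1) (c :: tail) w kel
                = pvRecList cfg alfabe f gens.reverse tail w kel := by
              simp only [pvRecB]; rw [if_neg hc, hg]
            have hmap : (gens.map (fun g => (g.toList ++ tail, w))).reverse
                = gens.reverse.map (fun g => (g.toList ++ tail, w)) := by
              simp [List.map_reverse]
            simp only [pvLoopA, if_neg hc, hg, ih, hmap, pvRunS_append,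
              ← pvRecList_eq_runS, pvRunS, hB]

-- ===== VERDICT (by name: the statement is the Claim_ definition above) =====
theorem kelimeleri_uret_spec : Claim_equal_kelimeleri_uret := by
  intro cfg s alfabe _
  unfold Spec_kelimeleri_uret kelimeleri_uret kelimeleri_uret_alt
  rw [pvLoopA_eq_runS]
  simp [pvRunS]
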